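-- pv_equiv track=rewrite | github.com/heytanuki/tinytask | main.py | sort_started_first
-- ===== SOURCE A (Python) =====
-- def sort_started_first(tasklist):
--     tasks_by_type = {
--         'started': [],
--         'notdone': [],
--         'done': []
--     }
--     for task in tasklist:
--         try:
--             tasks_by_type[task['status']].append(task)
--         except KeyError:
--             continue
--     tasks_ordered = tasks_by_type['started'] + tasks_by_type['notdone'] + tasks_by_type['done']
--     return tasks_ordered
-- ===== SOURCE B (Python) =====
-- def sort_started_first(tasklist):
--     rank = {'started': 0, 'notdone': 1, 'done': 2}
--     pairs = []
--     for task in tasklist: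
--         try:
--             r = rank[task['status']]
--         except KeyError:
--             continue
--         pairs.append((r, task))
--     return [t for _, t in sorted(pairs, key=lambda p: p[0])]
-- ===== Notes on version B (the rewrite author's own statement) =====
-- stated objective: alternative
-- what changed: Replaces the three-bucket dict grouping with a single pass that tags each task with a numeric priority (dropping tasks whose status is missing or unknown) followed by a stable sort on that priority.
import Mathlib
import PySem

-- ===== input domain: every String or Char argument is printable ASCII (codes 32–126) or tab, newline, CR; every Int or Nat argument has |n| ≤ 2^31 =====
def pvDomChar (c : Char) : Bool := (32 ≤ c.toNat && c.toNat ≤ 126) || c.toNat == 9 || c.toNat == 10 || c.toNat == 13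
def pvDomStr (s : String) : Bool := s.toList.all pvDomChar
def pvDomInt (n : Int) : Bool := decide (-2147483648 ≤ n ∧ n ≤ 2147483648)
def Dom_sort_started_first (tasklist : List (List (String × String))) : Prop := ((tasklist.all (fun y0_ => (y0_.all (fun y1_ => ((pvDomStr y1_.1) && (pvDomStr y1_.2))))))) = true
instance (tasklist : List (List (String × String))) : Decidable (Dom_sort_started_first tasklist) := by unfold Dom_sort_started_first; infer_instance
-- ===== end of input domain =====

-- B replaces A's three-bucket dict grouping by tagging each task with a numeric priority and
-- stably sorting on it (alternative algorithm, same cost class; same return value everywhere).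


-- ===== PORT A =====
-- task['status'] on a Python dict = first-match lookup in the association list; none = KeyError
def pvStatus (task : List (String × String)) : Option String :=
  (PySem.Dict.mk task).get? "status"

-- loop body: tasks_by_type[task['status']].append(task), KeyError (from either subscript) → continue
def pvStepA (d : PySem.Dict String (List (List (String × String))))
    (task : List (String × String)) : PySem.Dict String (List (List (String × String))) :=
  match pvStatus task with
  | none => d
  | some st =>
    match d.get? st with
    | none => d
    | some l => d.insert st (l ++ [task])

def sort_started_first (tasklist : List (List (String × String))) : List (List (String × String)) :=
  let tasks_by_type :=
    tasklist.foldl pvStepA (PySem.Dict.ofList [("started", []), ("notdone", []), ("done", [])])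
  tasks_by_type.getD "started" [] ++ tasks_by_type.getD "notdone" [] ++ tasks_by_type.getD "done" []

-- ===== PORT B =====
def pvRank : PySem.Dict String Int :=
  PySem.Dict.ofList [("started", 0), ("notdone", 1), ("done", 2)]

-- loop body: r = rank[task['status']] (KeyError → continue); pairs.append((r, task))
def pvStepB (acc : List (Int × List (String × String)))
    (task : List (String × String)) : List (Int × List (String × String)) :=
  match pvStatus task with
  | none => acc
  | some st =>
    match pvRank.get? st with
    | none => acc
    | some r => acc ++ [(r, task)]

def sort_started_first_alt (tasklist : List (List (String × String))) : List (List (String × String)) :=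
  let pairs := tasklist.foldl pvStepB []
  (PySem.List.sorted pairs (fun p => p.1) false).map (fun p => p.2)

-- ===== PRECONDITION & SPEC =====
def Spec_sort_started_first (tasklist : List (List (String × String))) (out : List (List (String × String))) : Prop := out = sort_started_first_alt tasklist
instance (tasklist : List (List (String × String))) (out : List (List (String × String))) : Decidable (Spec_sort_started_first tasklist out) := by unfold Spec_sort_started_first; infer_instance

-- ===== CLAIM (what is proved, stated in full; the proofs are below) =====
def Claim_equal_sort_started_first : Prop := ∀ (tasklist : List (List (String × String))), Dom_sort_started_first tasklist → Spec_sort_started_first tasklist (sort_started_first tasklist)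

-- ===== LEMMAS AND PROOFS =====

-- rank of a task as B computes it
def pvRk (t : List (String × String)) : Option Int :=
  match pvStatus t with
  | none => none
  | some st => pvRank.get? st

lemma pvRk_cases (t : List (String × String)) :
    pvRk t = none ∨
    (pvRk t = some 0 ∧ pvStatus t = some "started") ∨
    (pvRk t = some 1 ∧ pvStatus t = some "notdone") ∨
    (pvRk t = some 2 ∧ pvStatus t = some "done") := by
  unfold pvRk
  cases h : pvStatus t with
  | none => exact Or.inl rfl
  | some st =>
    by_cases h0 : st = "started"
    · subst h0; right; left; exact ⟨rfl, rfl⟩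
    · by_cases h1 : st = "notdone"
      · subst h1; right; right; left; exact ⟨rfl, rfl⟩
      · by_cases h2 : st = "done"
        · subst h2; right; right; right; exact ⟨rfl, rfl⟩
        · left
          have e0 : ("started" == st) = false := beq_eq_false_iff_ne.mpr (Ne.symm h0)
          have e1 : ("notdone" == st) = false := beq_eq_false_iff_ne.mpr (Ne.symm h1)
          have e2 : ("done" == st) = false := beq_eq_false_iff_ne.mpr (Ne.symm h2)
          simp [pvRank, PySem.Dict.ofList, PySem.Dict.update, PySem.Dict.insert,
                PySem.Dict.empty, PySem.Dict.contains, PySem.Dict.get?, List.find?, e0, e1, e2]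

-- ---- characterization of A's fold: the dict keeps the literal three-key shape ----
lemma stepA_char (tasks : List (List (String × String)))
    (g0 g1 g2 : List (List (String × String))) :
    tasks.foldl pvStepA (PySem.Dict.mk [("started", g0), ("notdone", g1), ("done", g2)]) =
      PySem.Dict.mk
        [("started", g0 ++ tasks.filter (fun t => pvStatus t == some "started")),
         ("notdone", g1 ++ tasks.filter (fun t => pvStatus t == some "notdone")),
         ("done",    g2 ++ tasks.filter (fun t => pvStatus t == some "done"))] := by
  induction tasks generalizing g0 g1 g2 with
  | nil => simp
  | cons t ts ih =>
    simp only [List.foldl_cons, List.filter_cons]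
    cases h : pvStatus t with
    | none =>
      simp only [pvStepA, h]
      simpa [h] using ih g0 g1 g2
    | some st =>
      by_cases h0 : st = "started"
      · subst h0
        have : pvStepA (PySem.Dict.mk [("started", g0), ("notdone", g1), ("done", g2)]) t =
            PySem.Dict.mk [("started", g0 ++ [t]), ("notdone", g1), ("done", g2)] := by
          simp [pvStepA, h, PySem.Dict.get?, PySem.Dict.insert, PySem.Dict.contains, List.find?]
        rw [this, ih]
        simp
      · by_cases h1 : st = "notdone"
        · subst h1
          have : pvStepA (PySem.Dict.mk [("started", g0), ("notdone", g1), ("done", g2)]) t =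
              PySem.Dict.mk [("started", g0), ("notdone", g1 ++ [t]), ("done", g2)] := by
            simp [pvStepA, h, PySem.Dict.get?, PySem.Dict.insert, PySem.Dict.contains, List.find?]
          rw [this, ih]
          simp
        · by_cases h2 : st = "done"
          · subst h2
            have : pvStepA (PySem.Dict.mk [("started", g0), ("notdone", g1), ("done", g2)]) t =
                PySem.Dict.mk [("started", g0), ("notdone", g1), ("done", g2 ++ [t])] := by
              simp [pvStepA, h, PySem.Dict.get?, PySem.Dict.insert, PySem.Dict.contains, List.find?]
            rw [this, ih]
            simp
          · have : pvStepA (PySem.Dict.mk [("started", g0), ("notdone", g1), ("done", g2)]) t =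
                PySem.Dict.mk [("started", g0), ("notdone", g1), ("done", g2)] := by
              have e0 : ("started" == st) = false := beq_eq_false_iff_ne.mpr (Ne.symm h0)
              have e1 : ("notdone" == st) = false := beq_eq_false_iff_ne.mpr (Ne.symm h1)
              have e2 : ("done" == st) = false := beq_eq_false_iff_ne.mpr (Ne.symm h2)
              simp [pvStepA, h, PySem.Dict.get?, List.find?, e0, e1, e2]
            rw [this, ih]
            simp [h0, h1, h2]

lemma A_char (tasklist : List (List (String × String))) :
    sort_started_first tasklist =
      tasklist.filter (fun t => pvStatus t == some "started") ++
      tasklist.filter (fun t => pvStatus t == some "notdone") ++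
      tasklist.filter (fun t => pvStatus t == some "done") := by
  unfold sort_started_first
  have h0 : PySem.Dict.ofList
      ([("started", []), ("notdone", []), ("done", [])] :
        List (String × List (List (String × String)))) =
      PySem.Dict.mk [("started", []), ("notdone", []), ("done", [])] := by rfl
  rw [h0, stepA_char]
  simp [PySem.Dict.getD, PySem.Dict.get?, List.find?]

-- ---- characterization of B ----
lemma stepB_char (tasks : List (List (String × String)))
    (acc : List (Int × List (String × String))) :
    tasks.foldl pvStepB acc =
      acc ++ tasks.filterMap (fun t => (pvRk t).map (fun r => (r, t))) := by
  induction tasks generalizing acc with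
  | nil => simp
  | cons t ts ih =>
    simp only [List.foldl_cons, List.filterMap_cons]
    cases h : pvStatus t with
    | none =>
      simp only [pvStepB, h]
      rw [ih]
      simp [pvRk, h]
    | some st =>
      cases hr : pvRank.get? st with
      | none =>
        simp only [pvStepB, h, hr]
        rw [ih]
        simp [pvRk, h, hr]
      | some r =>
        simp only [pvStepB, h, hr]
        rw [ih]
        simp [pvRk, h, hr]

-- insertion skips a prefix it is not before
lemma insertBy_append_of_not_before {α : Type} (before : α → α → Bool) (x : α)
    (l r : List α) (h : ∀ y ∈ l, before x y = false) :
    PySem.List.insertBy before x (l ++ r) = l ++ PySem.List.insertBy before x r := by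
  induction l with
  | nil => simp
  | cons y ys ih =>
    have hy : before x y = false := h y (by simp)
    have hcons : ∀ (l : List α),
        PySem.List.insertBy before x (y :: l) = y :: PySem.List.insertBy before x l := by
      intro l; simp [PySem.List.insertBy, hy]
    simp only [List.cons_append, hcons]
    rw [ih (fun y hy => h y (by simp [hy]))]

-- insertion goes right to the front when it is before everything
lemma insertBy_of_forall_before {α : Type} (before : α → α → Bool) (x : α)
    (r : List α) (h : ∀ y ∈ r, before x y = true) :
    PySem.List.insertBy before x r = x :: r := by
  cases r with
  | nil => simp [PySem.List.insertBy]
  | cons y ys => simp [PySem.List.insertBy, h y (by simp)]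

-- stable sort of pairs whose keys all lie in {0,1,2} is the three filters in order
lemma sort3 {α : Type} (xs : List (Int × α)) :
    ∀ (l0 l1 l2 : List (Int × α)),
    (∀ p ∈ xs, p.1 = 0 ∨ p.1 = 1 ∨ p.1 = 2) →
    (∀ p ∈ l0, p.1 = 0) → (∀ p ∈ l1, p.1 = 1) → (∀ p ∈ l2, p.1 = 2) →
    xs.foldl (fun acc x => PySem.List.insertBy (fun a b => decide (a.1 < b.1)) x acc)
        (l0 ++ l1 ++ l2) =
      (l0 ++ xs.filter (fun p => p.1 == 0)) ++ (l1 ++ xs.filter (fun p => p.1 == 1)) ++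
        (l2 ++ xs.filter (fun p => p.1 == 2)) := by
  induction xs with
  | nil => intro l0 l1 l2 _ _ _ _; simp
  | cons x ts ih =>
    intro l0 l1 l2 hx h0 h1 h2
    simp only [List.foldl_cons, List.filter_cons]
    rcases hx x (by simp) with hk | hk | hk
    · have hstep : PySem.List.insertBy (fun a b => decide (a.1 < b.1)) x (l0 ++ l1 ++ l2) =
          (l0 ++ [x]) ++ l1 ++ l2 := by
        rw [List.append_assoc, insertBy_append_of_not_before _ _ _ _
          (fun y hy => by have := h0 y hy; simp [hk, this]),
          insertBy_of_forall_before _ _ _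
          (fun y hy => by
            rcases List.mem_append.mp hy with h' | h'
            · have := h1 y h'; simp [hk, this]
            · have := h2 y h'; simp [hk, this])]
        simp
      rw [hstep, ih (l0 ++ [x]) l1 l2 (fun p hp => hx p (by simp [hp]))
        (fun p hp => by rcases List.mem_append.mp hp with h' | h'
                        · exact h0 p h'
                        · simpa using (by simpa using h') ▸ hk) h1 h2]
      simp [hk]
    · have hstep : PySem.List.insertBy (fun a b => decide (a.1 < b.1)) x (l0 ++ l1 ++ l2) =
          l0 ++ (l1 ++ [x]) ++ l2 := by
        rw [List.append_assoc, List.append_assoc, insertBy_append_of_not_before _ _ _ _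
          (fun y hy => by have := h0 y hy; simp [hk, this]),
          insertBy_append_of_not_before _ _ _ _
          (fun y hy => by have := h1 y hy; simp [hk, this]),
          insertBy_of_forall_before _ _ _
          (fun y hy => by have := h2 y hy; simp [hk, this])]
        simp
      rw [hstep, ih l0 (l1 ++ [x]) l2 (fun p hp => hx p (by simp [hp])) h0
        (fun p hp => by rcases List.mem_append.mp hp with h' | h'
                        · exact h1 p h'
                        · simpa using (by simpa using h') ▸ hk) h2]
      simp [hk]
    · have hstep : PySem.List.insertBy (fun a b => decide (a.1 < b.1)) x (l0 ++ l1 ++ l2) =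
          l0 ++ l1 ++ (l2 ++ [x]) := by
        rw [PySem.List.insertBy_of_forall_not_before _ _ _
          (fun y hy => by
            rcases List.mem_append.mp hy with h' | h'
            · rcases List.mem_append.mp h' with h'' | h''
              · have := h0 y h''; simp [hk, this]
              · have := h1 y h''; simp [hk, this]
            · have := h2 y h'; simp [hk, this])]
        simp
      rw [hstep, ih l0 l1 (l2 ++ [x]) (fun p hp => hx p (by simp [hp])) h0 h1
        (fun p hp => by rcases List.mem_append.mp hp with h' | h'
                        · exact h2 p h'
                        · simpa using (by simpa using h') ▸ hk)]
      simp [hk]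

-- map snd of one key-filter of B's pairs is A's status-filter
lemma filter_pairs (tasklist : List (List (String × String))) (r : Int) (k : String)
    (hrk : ∀ t, pvRk t = some r ↔ pvStatus t = some k) :
    (((tasklist.filterMap (fun t => (pvRk t).map (fun x => (x, t)))).filter
        (fun p => p.1 == r)).map (fun p => p.2)) =
      tasklist.filter (fun t => pvStatus t == some k) := by
  induction tasklist with
  | nil => simp
  | cons t ts ih =>
    simp only [List.filterMap_cons, List.filter_cons]
    cases h : pvRk t with
    | none =>
      have hne : pvStatus t ≠ some k := fun hc => by rw [← hrk t] at hc; simp [h] at hc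
      simp [ih, hne]
    | some r' =>
      by_cases hr : r' = r
      · subst hr
        have := (hrk t).mp h
        simp [List.map_cons, ih, this]
      · have hne : pvStatus t ≠ some k := fun hc => by
          rw [← hrk t] at hc; rw [h] at hc; exact hr (by injection hc)
        simp [ih, hne, hr]

lemma B_char (tasklist : List (List (String × String))) :
    sort_started_first_alt tasklist =
      tasklist.filter (fun t => pvStatus t == some "started") ++
      tasklist.filter (fun t => pvStatus t == some "notdone") ++
      tasklist.filter (fun t => pvStatus t == some "done") := by
  have hdef : sort_started_first_alt tasklist =
      (PySem.List.sorted (tasklist.foldl pvStepB []) (fun p => p.1) false).map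
        (fun p => p.2) := rfl
  rw [hdef, stepB_char, List.nil_append, PySem.List.sorted_eq_foldl_insertBy]
  set ps := tasklist.filterMap (fun t => (pvRk t).map (fun r => (r, t))) with hps
  have hkeys : ∀ p ∈ ps, p.1 = 0 ∨ p.1 = 1 ∨ p.1 = 2 := by
    intro p hp
    rw [hps] at hp
    rcases List.mem_filterMap.mp hp with ⟨t, _, hmap⟩
    rcases Option.map_eq_some_iff.mp hmap with ⟨r, hr, hpr⟩
    subst hpr
    rcases pvRk_cases t with h | ⟨h, _⟩ | ⟨h, _⟩ | ⟨h, _⟩ <;> rw [h] at hr <;> simp_all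
  have := sort3 ps [] [] [] hkeys (by simp) (by simp) (by simp)
  simp only [List.nil_append, List.append_nil] at this
  rw [this]
  have hrk0 : ∀ t, pvRk t = some 0 ↔ pvStatus t = some "started" := by
    intro t
    constructor
    · intro h
      rcases pvRk_cases t with h0 | ⟨h0, h0'⟩ | ⟨h0, h0'⟩ | ⟨h0, h0'⟩ <;> rw [h0] at h <;>
        simp_all
    · intro hc
      simp [pvRk, hc, pvRank, PySem.Dict.ofList, PySem.Dict.update, PySem.Dict.insert,
        PySem.Dict.empty, PySem.Dict.contains, PySem.Dict.get?]
  have hrk1 : ∀ t, pvRk t = some 1 ↔ pvStatus t = some "notdone" := by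
    intro t
    constructor
    · intro h
      rcases pvRk_cases t with h0 | ⟨h0, h0'⟩ | ⟨h0, h0'⟩ | ⟨h0, h0'⟩ <;> rw [h0] at h <;>
        simp_all
    · intro hc
      simp [pvRk, hc, pvRank, PySem.Dict.ofList, PySem.Dict.update, PySem.Dict.insert,
        PySem.Dict.empty, PySem.Dict.contains, PySem.Dict.get?, List.find?]
  have hrk2 : ∀ t, pvRk t = some 2 ↔ pvStatus t = some "done" := by
    intro t
    constructor
    · intro h
      rcases pvRk_cases t with h0 | ⟨h0, h0'⟩ | ⟨h0, h0'⟩ | ⟨h0, h0'⟩ <;> rw [h0] at h <;>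
        simp_all
    · intro hc
      simp [pvRk, hc, pvRank, PySem.Dict.ofList, PySem.Dict.update, PySem.Dict.insert,
        PySem.Dict.empty, PySem.Dict.contains, PySem.Dict.get?, List.find?]
  rw [List.map_append, List.map_append,
    filter_pairs tasklist 0 "started" hrk0,
    filter_pairs tasklist 1 "notdone" hrk1,
    filter_pairs tasklist 2 "done" hrk2]

-- ===== VERDICT (by name: the statement is the Claim_ definition above) =====
theorem sort_started_first_spec : Claim_equal_sort_started_first := by
  intro tasklist _
  unfold Spec_sort_started_first
  rw [A_char, B_char]
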